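-- pv_equiv track=rewrite | github.com/marklee77/vpack | vectorpack/stillwell_current/packs.py | _split_problem
-- ===== SOURCE A (Python) =====
-- from itertools import accumulate, product
--
-- def _split_problem(item_idxs, bin_idxs, split):
--
--     items_sublist_size, items_remaining = divmod(len(item_idxs), split)
--     items_sublist_ubs = list(accumulate(
--         [items_sublist_size] * (split - items_remaining) +
--         [items_sublist_size+1] * items_remaining))
--
--     item_idxs_sublists = [item_idxs[lb:ub] for lb, ub in
--                           zip([0] + items_sublist_ubs[:-1], items_sublist_ubs)]
--
--     bins_sublist_size, bins_remaining = divmod(len(bin_idxs), split)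
--     bins_sublist_ubs = list(accumulate(
--         [bins_sublist_size] * (split - bins_remaining) +
--         [bins_sublist_size+1] * bins_remaining))
--
--     bin_idxs_sublists = [bin_idxs[lb:ub] for lb, ub in
--                          zip([0] + bins_sublist_ubs[:-1], bins_sublist_ubs)]
--
--     return zip(item_idxs_sublists, bin_idxs_sublists)
-- ===== SOURCE B (Python) =====
-- def _split_problem(item_idxs, bin_idxs, split):
--     # Greedy single pass: repeatedly take floor(remaining/len-of-remaining-splits)
--     # elements from the current position; no sizes list, no cumulative sums.
--     def chunks(lst, k):
--         out = []
--         pos = 0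
--         while k > 0:
--             take = (len(lst) - pos) // k
--             out.append(lst[pos:pos + take])
--             pos += take
--             k -= 1
--         return out
--     return zip(chunks(item_idxs, split), chunks(bin_idxs, split))
-- ===== Notes on version B (the rewrite author's own statement) =====
-- stated objective: alternative
-- what changed: B partitions each list by a greedy single-pass loop that at each step divides the REMAINING length by the REMAINING number of chunks and takes that many elements, instead of A's global divmod + sizes list + itertools.accumulate + zip-of-shifted-prefixes cut-point construction; the greedy residual division provably yields the same partition (q-sized chunks first, (q+1)-sized last).
import Mathlib
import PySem

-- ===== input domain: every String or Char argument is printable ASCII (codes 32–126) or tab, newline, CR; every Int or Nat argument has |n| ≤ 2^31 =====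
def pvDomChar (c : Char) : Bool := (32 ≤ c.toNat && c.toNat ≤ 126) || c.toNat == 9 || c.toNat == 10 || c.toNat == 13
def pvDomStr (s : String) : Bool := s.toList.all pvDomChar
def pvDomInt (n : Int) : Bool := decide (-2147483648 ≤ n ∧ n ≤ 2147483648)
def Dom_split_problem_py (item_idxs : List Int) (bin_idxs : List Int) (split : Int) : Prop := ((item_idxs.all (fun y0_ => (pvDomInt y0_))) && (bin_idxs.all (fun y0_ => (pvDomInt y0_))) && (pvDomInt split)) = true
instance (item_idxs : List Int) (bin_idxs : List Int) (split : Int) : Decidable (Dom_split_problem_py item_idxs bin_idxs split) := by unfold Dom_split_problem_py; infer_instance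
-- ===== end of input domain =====

-- B partitions each list by a greedy single pass (take (remaining length)//(remaining chunks)
-- at each step) instead of A's divmod/sizes-list/accumulate cut-point construction
-- (objective: alternative; return-value equivalence, split = 0 excluded since A raises there).


-- ===== PORT A =====
-- itertools.accumulate (running sums, no initial value)
def pvAccum (s : Int) : List Int → List Int
  | [] => []
  | x :: xs => (s + x) :: pvAccum (s + x) xs

-- the identical sublist-building block A performs once for item_idxs and once for bin_idxs
def pvSublistsA (lst : List Int) (split : Int) : List (List Int) :=
  match PySem.Int.divmod? lst.length split with
  | none => []   -- split = 0: Python raises ZeroDivisionError; excluded by Pre_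
  | some (size, remaining) =>
    let ubs := pvAccum 0 (List.replicate (split - remaining).toNat size ++
                          List.replicate remaining.toNat (size + 1))
    (List.zip ((0 : Int) :: PySem.List.slice ubs none (some (-1))) ubs).map
      (fun p => PySem.List.slice lst (some p.1) (some p.2))

def split_problem_py (item_idxs : List Int) (bin_idxs : List Int) (split : Int) : List (List Int × List Int) :=
  List.zip (pvSublistsA item_idxs split) (pvSublistsA bin_idxs split)

-- ===== PORT B =====
-- the while loop of B's `chunks`, state (pos, k); it runs exactly max(k,0) times,
-- so the counter k.toNat drives the structural recursion
def pvChunksBGo (lst : List Int) (pos : Int) (k : Int) : Nat → List (List Int)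
  | 0 => []
  | Nat.succ fuel =>
      PySem.List.slice lst (some pos)
          (some (pos + PySem.Int.floordiv ((lst.length : Int) - pos) k)) ::
        pvChunksBGo lst (pos + PySem.Int.floordiv ((lst.length : Int) - pos) k) (k - 1) fuel

def pvChunksB (lst : List Int) (pos : Int) (k : Int) : List (List Int) :=
  pvChunksBGo lst pos k k.toNat

def split_problem_py_alt (item_idxs : List Int) (bin_idxs : List Int) (split : Int) : List (List Int × List Int) :=
  List.zip (pvChunksB item_idxs 0 split) (pvChunksB bin_idxs 0 split)

-- ===== PRECONDITION & SPEC =====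
-- Pre_ excludes only split = 0, where Python A raises ZeroDivisionError.
def Pre_split_problem_py (item_idxs : List Int) (bin_idxs : List Int) (split : Int) : Prop := split ≠ 0
instance (item_idxs : List Int) (bin_idxs : List Int) (split : Int) : Decidable (Pre_split_problem_py item_idxs bin_idxs split) := by unfold Pre_split_problem_py; infer_instance
def pvWitness_split_problem_py : List Int × List Int × Int := ([1, 2, 3], [4, 5], 2)

def Spec_split_problem_py (item_idxs : List Int) (bin_idxs : List Int) (split : Int) (out : List (List Int × List Int)) : Prop := out = split_problem_py_alt item_idxs bin_idxs split
instance (item_idxs : List Int) (bin_idxs : List Int) (split : Int) (out : List (List Int × List Int)) : Decidable (Spec_split_problem_py item_idxs bin_idxs split out) := by unfold Spec_split_problem_py; infer_instance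

-- ===== CLAIM (what is proved, stated in full; the proofs are below) =====
def Claim_equal_split_problem_py : Prop := ∀ (item_idxs : List Int) (bin_idxs : List Int) (split : Int), Dom_split_problem_py item_idxs bin_idxs split → Pre_split_problem_py item_idxs bin_idxs split → Spec_split_problem_py item_idxs bin_idxs split (split_problem_py item_idxs bin_idxs split)
-- ===== LEMMAS AND PROOFS =====

-- the common closed-form partition both algorithms produce: chunk i is
-- lst[bound i : bound (i+1)] with bound i = i*q + max 0 (i - (split - r))
def pvBound (q r split i : Int) : Int := i * q + max 0 (i - (split - r))

def pvBMap (lst : List Int) (split : Int) : List (List Int) :=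
  match PySem.Int.divmod? lst.length split with
  | none => []
  | some (q, r) =>
    (PySem.List.pyRange 0 split 1).map
      (fun i => PySem.List.slice lst (some (pvBound q r split i)) (some (pvBound q r split (i + 1))))

-- accumulate splits over append
lemma pvAccum_append (s : Int) (xs ys : List Int) :
    pvAccum s (xs ++ ys) = pvAccum s xs ++ pvAccum (s + xs.sum) ys := by
  induction xs generalizing s with
  | nil => simp [pvAccum]
  | cons x xs ih => simp [pvAccum, ih, add_assoc]

lemma pvDivmod_eq (n b : Int) (hb : b ≠ 0) :
    PySem.Int.divmod? n b = some (PySem.Int.floordiv n b, PySem.Int.mod n b) := by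
  simp [PySem.Int.divmod?, PySem.Int.floordiv, PySem.Int.mod, hb]

-- accumulate of a constant list is an arithmetic progression
lemma pvAccum_replicate (s c : Int) (m : Nat) :
    pvAccum s (List.replicate m c) = (List.range m).map (fun (i : Nat) => s + ((i : Int) + 1) * c) := by
  induction m generalizing s with
  | zero => simp [pvAccum]
  | succ m ih =>
    rw [List.replicate_succ, List.range_succ_eq_map]
    simp only [pvAccum, ih, List.map_cons, List.map_map, List.cons.injEq]
    constructor
    · push_cast; ring
    · apply List.map_congr_left
      intro i _
      simp only [Function.comp]
      push_cast
      ring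

-- zip of (0 :: ubs[:-1]) with ubs, for ubs given by a boundary function g with g 0 = 0
lemma pvZip_shift (g : Nat → Int) (hg : g 0 = 0) (k : Nat) :
    List.zip ((0 : Int) :: ((List.range k).map (fun i => g (i + 1))).dropLast)
             ((List.range k).map (fun i => g (i + 1)))
    = (List.range k).map (fun i => (g i, g (i + 1))) := by
  apply List.ext_getElem
  · simp [List.length_zip, List.length_dropLast]
    omega
  · intro i h1 h2
    simp only [List.getElem_zip, List.getElem_map, List.getElem_range]
    rcases i with _ | i
    · simp [hg]
    · have hlen : i < (((List.range k).map (fun i => g (i + 1))).dropLast).length := by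
        simp only [List.length_map, List.length_range, List.length_zip, List.length_cons,
          List.length_dropLast] at h1 ⊢
        omega
      simp [List.getElem_cons_succ, List.getElem_dropLast, List.getElem_map, List.getElem_range]

-- the accumulate-based upper bounds ARE the closed-form boundaries
lemma pvUbs_eq (q : Int) (a b : Nat) :
    pvAccum 0 (List.replicate a q ++ List.replicate b (q + 1))
    = (List.range (a + b)).map (fun (i : Nat) => (((i + 1 : Nat) : Int)) * q + max 0 (((i + 1 : Nat) : Int) - (a : Int))) := by
  rw [pvAccum_append, pvAccum_replicate, pvAccum_replicate, List.range_add, List.map_append]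
  congr 1
  · apply List.map_congr_left
    intro i hi
    simp only [List.mem_range] at hi
    have : max (0 : Int) (((i + 1 : Nat) : Int) - (a : Int)) = 0 := by
      push_cast; omega
    rw [this]
    push_cast; ring
  · rw [List.map_map]
    apply List.map_congr_left
    intro j _
    simp only [Function.comp, List.sum_replicate]
    have : max (0 : Int) (((a + j + 1 : Nat) : Int) - (a : Int)) = (j : Int) + 1 := by
      push_cast; omega
    rw [this]
    push_cast; ring

-- A's sublists equal the closed-form partition (every split ≠ 0)
lemma pvSublistsA_eq_bmap (lst : List Int) (split : Int) (hs : split ≠ 0) :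
    pvSublistsA lst split = pvBMap lst split := by
  rcases lt_or_gt_of_ne hs with hneg | hpos
  · -- split < 0 : both sides are []
    unfold pvSublistsA pvBMap
    simp only [pvDivmod_eq _ _ hs]
    have hb := PySem.Int.mod_neg_bounds (a := (lst.length : Int)) hneg
    have h1 : (split - PySem.Int.mod (lst.length : Int) split).toNat = 0 := by omega
    have h2 : (PySem.Int.mod (lst.length : Int) split).toNat = 0 := by omega
    rw [PySem.List.pyRange_one_eq_nil (by omega)]
    simp [h1, h2, pvAccum, PySem.List.slice_to_neg_one]
  · -- split > 0
    unfold pvSublistsA pvBMap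
    simp only [pvDivmod_eq _ _ hs]
    set q := PySem.Int.floordiv (lst.length : Int) split with hq
    set r := PySem.Int.mod (lst.length : Int) split with hr
    have hr0 : 0 ≤ r := PySem.Int.mod_nonneg _ hpos
    have hrlt : r < split := PySem.Int.mod_lt _ hpos
    set a : Nat := (split - r).toNat with ha
    set b : Nat := r.toNat with hb
    have haInt : (a : Int) = split - r := by omega
    have hk : a + b = split.toNat := by omega
    set g : Nat → Int := fun i => (i : Int) * q + max 0 ((i : Int) - (a : Int)) with hg
    have hubs : pvAccum 0 (List.replicate a q ++ List.replicate b (q + 1))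
        = (List.range (a + b)).map (fun i => g (i + 1)) := by
      rw [pvUbs_eq]
    rw [hubs, PySem.List.slice_to_neg_one, pvZip_shift g (by simp [hg]), List.map_map,
        PySem.List.pyRange_one, List.map_map, hk, sub_zero]
    apply List.map_congr_left
    intro i _
    simp only [Function.comp, pvBound, hg, zero_add]
    rw [← haInt]
    push_cast
    ring_nf

-- boundary shift: one greedy step (take q = (n-pos)//k elements) turns the closed-form
-- boundaries for (n-pos, k) into q plus the boundaries for (n-pos-q, k-1)
lemma pvShift (k q r q' r' i : Int) (hk : 2 ≤ k) (hr0 : 0 ≤ r) (hrk : r < k)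
    (hr'0 : 0 ≤ r') (hr'k : r' < k - 1)
    (heq : q' * (k - 1) + r' = q * k + r - q)
    (hi0 : 0 ≤ i) (hik : i ≤ k - 1) :
    pvBound q r k (i + 1) = q + pvBound q' r' (k - 1) i := by
  have hd : (q' - q) * (k - 1) = r - r' := by linear_combination heq
  have hcase : (q' = q ∧ r' = r) ∨ (q' = q + 1 ∧ r = k - 1 ∧ r' = 0) := by
    by_cases hqq : q' = q
    · subst hqq
      left
      refine ⟨rfl, ?_⟩
      have : (0 : Int) = r - r' := by linear_combination hd
      omega
    · right
      rcases lt_or_gt_of_ne hqq with h | h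
      · exfalso
        have h1 : (q' - q) * (k - 1) ≤ (-1) * (k - 1) :=
          mul_le_mul_of_nonneg_right (by omega) (by omega)
        rw [hd] at h1
        omega
      · have h1 : 1 * (k - 1) ≤ (q' - q) * (k - 1) :=
          mul_le_mul_of_nonneg_right (by omega) (by omega)
        rw [hd] at h1
        have hra : r = k - 1 := by omega
        have hrb : r' = 0 := by omega
        subst hra; subst hrb
        have h2 : (q' - q - 1) * (k - 1) = 0 := by linear_combination hd
        rcases mul_eq_zero.mp h2 with h3 | h3
        · exact ⟨by omega, rfl, rfl⟩
        · omega
  rcases hcase with ⟨hq, hr⟩ | ⟨hq, hrr, hr'⟩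
  · subst hq; subst hr
    unfold pvBound
    have harg : i + 1 - (k - r') = i - (k - 1 - r') := by ring
    rw [harg]
    ring
  · subst hq; subst hrr; subst hr'
    unfold pvBound
    have h1 : max 0 (i + 1 - (k - (k - 1))) = i := by omega
    have h2 : max 0 (i - (k - 1 - 0)) = 0 := by omega
    rw [h1, h2]
    ring

-- the greedy loop produces exactly the closed-form partition of the remainder lst[pos:]
lemma pvGo_eq_map : ∀ (m : Nat) (k pos : Int) (lst : List Int), 0 < k → k.toNat = m →
    0 ≤ pos → pos ≤ (lst.length : Int) →
    pvChunksBGo lst pos k m = (PySem.List.pyRange 0 k 1).map (fun i =>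
      PySem.List.slice lst
        (some (pos + pvBound (PySem.Int.floordiv ((lst.length : Int) - pos) k)
                             (PySem.Int.mod ((lst.length : Int) - pos) k) k i))
        (some (pos + pvBound (PySem.Int.floordiv ((lst.length : Int) - pos) k)
                             (PySem.Int.mod ((lst.length : Int) - pos) k) k (i + 1)))) := by
  intro m
  induction m with
  | zero => intro k pos lst hk hm _ _; omega
  | succ m ih =>
    intro k pos lst hk hm hpos hposn
    rw [pvChunksBGo, PySem.List.pyRange_one_cons (by omega), List.map_cons]
    set q := PySem.Int.floordiv ((lst.length : Int) - pos) k with hq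
    set r := PySem.Int.mod ((lst.length : Int) - pos) k with hr
    have hr0 : 0 ≤ r := by rw [hr]; exact PySem.Int.mod_nonneg _ hk
    have hrlt : r < k := by rw [hr]; exact PySem.Int.mod_lt _ hk
    have hq0 : 0 ≤ q := by
      rw [hq, PySem.Int.floordiv_eq_ediv_of_pos hk]
      exact Int.ediv_nonneg (by omega) (by omega)
    have hqle : q ≤ (lst.length : Int) - pos := by
      rw [hq, PySem.Int.floordiv_eq_ediv_of_pos hk]
      exact Int.ediv_le_self _ (by omega)
    simp only [zero_add]
    congr 1
    · -- head chunk
      have h0 : pvBound q r k 0 = 0 := by unfold pvBound; omega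
      have h1 : pvBound q r k 1 = q := by
        unfold pvBound
        have : max (0 : Int) (1 - (k - r)) = 0 := by omega
        rw [this]; ring
      rw [h0, h1, add_zero]
    · -- tail chunks
      by_cases hk1 : k = 1
      · subst hk1
        have hm0 : m = 0 := by omega
        subst hm0
        rw [pvChunksBGo, PySem.List.pyRange_one_eq_nil (by omega)]
        simp
      · have hk2 : 2 ≤ k := by omega
        rw [ih (k - 1) (pos + q) lst (by omega) (by omega) (by omega) (by omega)]
        set q' := PySem.Int.floordiv ((lst.length : Int) - (pos + q)) (k - 1) with hq'
        set r' := PySem.Int.mod ((lst.length : Int) - (pos + q)) (k - 1) with hr'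
        have hr'0 : 0 ≤ r' := by rw [hr']; exact PySem.Int.mod_nonneg _ (by omega)
        have hr'lt : r' < k - 1 := by rw [hr']; exact PySem.Int.mod_lt _ (by omega)
        have e1 : q * k + r = (lst.length : Int) - pos := by
          rw [hq, hr]; exact PySem.Int.floordiv_mul_add_mod _ _
        have e2 : q' * (k - 1) + r' = (lst.length : Int) - (pos + q) := by
          rw [hq', hr']; exact PySem.Int.floordiv_mul_add_mod _ _
        have heq : q' * (k - 1) + r' = q * k + r - q := by omega
        rw [PySem.List.pyRange_one 0 (k - 1), PySem.List.pyRange_one 1 k, sub_zero]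
        rw [List.map_map, List.map_map]
        apply List.map_congr_left
        intro j hj
        have hjlt : (j : Int) < k - 1 := by
          simp only [List.mem_range] at hj
          omega
        have s1 : pvBound q r k ((j : Int) + 1) = q + pvBound q' r' (k - 1) (j : Int) :=
          pvShift k q r q' r' (j : Int) hk2 hr0 hrlt hr'0 hr'lt heq (by omega) (by omega)
        have s2 : pvBound q r k ((j : Int) + 1 + 1) = q + pvBound q' r' (k - 1) ((j : Int) + 1) :=
          pvShift k q r q' r' ((j : Int) + 1) hk2 hr0 hrlt hr'0 hr'lt heq (by omega) (by omega)
        simp only [Function.comp, zero_add]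
        have ha : (1 : Int) + (j : Int) = (j : Int) + 1 := by ring
        rw [ha, s1, s2]
        ring_nf

-- B's greedy chunks equal the closed-form partition (every split ≠ 0)
lemma pvChunksB_eq_bmap (lst : List Int) (split : Int) (hs : split ≠ 0) :
    pvChunksB lst 0 split = pvBMap lst split := by
  rcases lt_or_gt_of_ne hs with hneg | hpos
  · unfold pvChunksB pvBMap
    have h0 : split.toNat = 0 := by omega
    rw [h0, pvDivmod_eq _ _ hs, PySem.List.pyRange_one_eq_nil (by omega)]
    simp [pvChunksBGo]
  · unfold pvChunksB pvBMap
    rw [pvGo_eq_map split.toNat split 0 lst hpos rfl (le_refl 0) (Int.natCast_nonneg _),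
        pvDivmod_eq _ _ hs]
    simp only [sub_zero, zero_add]

-- ===== VERDICT (by name: the statement is the Claim_ definition above) =====
theorem split_problem_py_spec : Claim_equal_split_problem_py := by
  intro item_idxs bin_idxs split _ hpre
  unfold Spec_split_problem_py split_problem_py split_problem_py_alt
  rw [pvSublistsA_eq_bmap _ _ hpre, pvSublistsA_eq_bmap _ _ hpre,
      pvChunksB_eq_bmap _ _ hpre, pvChunksB_eq_bmap _ _ hpre]
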